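-- pv_equiv track=rewrite | github.com/AbdurRazzakRana/SARDH_Implementation | t9_calc_array_reuse.py | get_unique_non_numeric_refs
-- ===== SOURCE A (Python) =====
-- def get_unique_non_numeric_refs(data):
--     def is_number(s):
--         return s.isdigit()
--
--     # Track last occurrence of cleaned non-numeric, non-empty items
--     last_occurrence = {}
--     for i, item in enumerate(data):
--         cleaned = item.strip('[]')
--         if cleaned and not cleaned.isdigit():
--             last_occurrence[cleaned] = i
--
--     # Build result list
--     result = []
--     for i, item in enumerate(data):
--         cleaned = item.strip('[]')
--         if cleaned and not cleaned.isdigit() and last_occurrence[cleaned] == i: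
--             result.append(cleaned)
--
--     return result
-- ===== SOURCE B (Python) =====
-- def get_unique_non_numeric_refs(data):
--     # Single pass: an order-preserving dict with move-to-end on re-occurrence;
--     # the keys at the end are exactly the cleaned items in last-occurrence order.
--     d = {}
--     for item in data:
--         cleaned = item.strip('[]')
--         if cleaned and not cleaned.isdigit():
--             d.pop(cleaned, None)
--             d[cleaned] = None
--     return list(d.keys())
-- ===== Notes on version B (the rewrite author's own statement) =====
-- stated objective: simpler
-- what changed: Replaced A's two passes (build a dict of last-occurrence indices over enumerate, then re-scan and filter by index equality) with a single pass that keeps an order-preserving dict and moves a key to the end on re-occurrence (pop then reinsert), returning its keys.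
import Mathlib
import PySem

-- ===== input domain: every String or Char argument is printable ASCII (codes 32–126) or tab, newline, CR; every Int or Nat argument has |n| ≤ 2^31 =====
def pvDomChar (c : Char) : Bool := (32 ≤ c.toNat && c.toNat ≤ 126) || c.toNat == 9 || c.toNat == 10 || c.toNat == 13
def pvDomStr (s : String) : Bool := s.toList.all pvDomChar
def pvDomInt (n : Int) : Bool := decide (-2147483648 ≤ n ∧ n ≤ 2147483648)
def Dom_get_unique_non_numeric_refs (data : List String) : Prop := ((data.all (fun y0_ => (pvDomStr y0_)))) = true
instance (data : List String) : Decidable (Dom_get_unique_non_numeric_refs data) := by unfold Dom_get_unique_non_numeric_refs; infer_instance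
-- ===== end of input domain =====

-- B replaces A's build-last-index-table-then-filter two-pass scheme by a single pass over the data
-- with a move-to-end insertion-ordered dict whose final keys are the answer (objective: simpler).

-- ===== PORT A =====
def get_unique_non_numeric_refs (data : List String) : List String :=
  let last_occurrence : PySem.Dict String Int :=
    (PySem.List.enumerate data).foldl (fun d p =>
      let cleaned := PySem.Str.stripChars p.2 "[]"
      if cleaned != "" && !PySem.Str.strIsdigit cleaned then d.insert cleaned p.1 else d)
      PySem.Dict.empty
  (PySem.List.enumerate data).foldl (fun result p =>
      let cleaned := PySem.Str.stripChars p.2 "[]"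
      -- last_occurrence[cleaned]: the key is always present when this branch is reached (pass 1
      -- inserted it under the same test), so getD's default -1 (never an enumerate index) is unreachable
      if cleaned != "" && !PySem.Str.strIsdigit cleaned
          && (last_occurrence.getD cleaned (-1) == p.1)
      then result ++ [cleaned] else result) []

-- ===== PORT B =====
def get_unique_non_numeric_refs_alt (data : List String) : List String :=
  (data.foldl (fun (d : PySem.Dict String (Option Unit)) item =>
      let cleaned := PySem.Str.stripChars item "[]"
      if cleaned != "" && !PySem.Str.strIsdigit cleaned then
        (d.erase cleaned).insert cleaned none   -- d.pop(cleaned, None); d[cleaned] = None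
      else d)
    PySem.Dict.empty).keys

-- ===== PRECONDITION & SPEC =====
def Spec_get_unique_non_numeric_refs (data : List String) (out : List String) : Prop := out = get_unique_non_numeric_refs_alt data
instance (data : List String) (out : List String) : Decidable (Spec_get_unique_non_numeric_refs data out) := by unfold Spec_get_unique_non_numeric_refs; infer_instance

-- ===== CLAIM (what is proved, stated in full; the proofs are below) =====
def Claim_equal_get_unique_non_numeric_refs : Prop := ∀ (data : List String), Dom_get_unique_non_numeric_refs data → Spec_get_unique_non_numeric_refs data (get_unique_non_numeric_refs data)

-- ===== LEMMAS AND PROOFS =====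

def pvClean (s : String) : String := PySem.Str.stripChars s "[]"
def pvKeep (s : String) : Bool := pvClean s != "" && !PySem.Str.strIsdigit (pvClean s)
def pvF (data : List String) : List String :=
  data.filterMap (fun s => if pvKeep s then some (pvClean s) else none)

/-- Reference function: keep each element's LAST occurrence, in order. -/
def pvLast : List String → List String
  | [] => []
  | x :: xs => if x ∈ xs then pvLast xs else x :: pvLast xs

lemma pvF_append (xs : List String) (x : String) :
    pvF (xs ++ [x]) = pvF xs ++ (if pvKeep x then [pvClean x] else []) := by
  by_cases h : pvKeep x <;> simp [pvF, List.filterMap_append, h]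

lemma pvLast_append (c : String) : ∀ (as : List String),
    pvLast (as ++ [c]) = (pvLast as).filter (fun s => s != c) ++ [c]
  | [] => by simp [pvLast]
  | a :: as => by
    by_cases hac : a = c
    · subst hac
      by_cases h : a ∈ as
      · simp [pvLast, h, pvLast_append a as]
      · simp [pvLast, h, pvLast_append a as]
    · by_cases h : a ∈ as
      · simp [pvLast, h, hac, pvLast_append c as]
      · simp [pvLast, h, pvLast_append c as, bne_iff_ne, hac]

-- ---- B side ----

def pvStepB (d : PySem.Dict String (Option Unit)) (item : String) : PySem.Dict String (Option Unit) :=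
  if pvKeep item then (d.erase (pvClean item)).insert (pvClean item) none else d

lemma keys_move (d : PySem.Dict String (Option Unit)) (c : String) (v : Option Unit) :
    ((d.erase c).insert c v).keys = d.keys.filter (fun k => k != c) ++ [c] := by
  simp [PySem.Dict.insert, PySem.Dict.erase, PySem.Dict.contains,
        PySem.Dict.keys, List.filter_map, List.any_filter]
  rfl

lemma alt_eq_foldl (data : List String) :
    get_unique_non_numeric_refs_alt data = (data.foldl pvStepB PySem.Dict.empty).keys := rfl

lemma B_eq : ∀ (data : List String),
    get_unique_non_numeric_refs_alt data = pvLast (pvF data) := by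
  intro data
  induction data using List.reverseRecOn with
  | nil => simp [get_unique_non_numeric_refs_alt, pvF, pvLast, PySem.Dict.keys, PySem.Dict.empty]
  | append_singleton xs x ih =>
    rw [alt_eq_foldl] at ih ⊢
    rw [List.foldl_append, pvF_append]
    by_cases hk : pvKeep x
    · simp only [List.foldl, pvStepB, hk, if_pos, keys_move, ih]
      rw [pvLast_append]
    · simp [pvStepB, hk, ih]

-- ---- A side ----

def pvLo (data : List String) : PySem.Dict String Int :=
  (PySem.List.enumerate data).foldl
    (fun d p => if pvKeep p.2 then d.insert (pvClean p.2) p.1 else d) PySem.Dict.empty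

def pvCond (lo : PySem.Dict String Int) (p : Int × String) : Bool :=
  pvKeep p.2 && (lo.getD (pvClean p.2) (-1) == p.1)

def pvPass2 (lo : PySem.Dict String Int) (l : List (Int × String)) : List String :=
  (l.filter (pvCond lo)).map (fun p => pvClean p.2)

lemma foldl_pass2 (lo : PySem.Dict String Int) :
    ∀ (l : List (Int × String)) (acc : List String),
    l.foldl (fun result p =>
      if pvCond lo p then result ++ [pvClean p.2] else result) acc = acc ++ pvPass2 lo l
  | [], acc => by simp [pvPass2]
  | p :: l, acc => by
    by_cases h : pvCond lo p
    · simp [h, foldl_pass2 lo l, pvPass2]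
    · simp [h, foldl_pass2 lo l, pvPass2]

lemma A_unfold (data : List String) :
    get_unique_non_numeric_refs data = pvPass2 (pvLo data) (PySem.List.enumerate data) := by
  have h2 := foldl_pass2 (pvLo data) (PySem.List.enumerate data) []
  simp only [List.nil_append] at h2
  rw [← h2]
  rfl

lemma pvLo_append (xs : List String) (x : String) :
    pvLo (xs ++ [x]) =
      if pvKeep x then (pvLo xs).insert (pvClean x) (xs.length : Int) else pvLo xs := by
  simp [pvLo, PySem.List.enumerate_append, List.foldl_append, PySem.List.enumerate_cons,
        PySem.List.enumerate_nil]

lemma pvPass2_append (lo : PySem.Dict String Int) (l : List (Int × String)) (p : Int × String) :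
    pvPass2 lo (l ++ [p]) =
      pvPass2 lo l ++ (if pvCond lo p then [pvClean p.2] else []) := by
  by_cases h : pvCond lo p <;> simp [pvPass2, List.filter_append, h]

lemma pvPass2_insert_shift (c : String) (n : Int) (lo : PySem.Dict String Int) :
    ∀ (l : List (Int × String)), (∀ p ∈ l, p.1 < n) →
    pvPass2 (lo.insert c n) l = (pvPass2 lo l).filter (fun s => s != c)
  | [], _ => by simp [pvPass2]
  | p :: l, h => by
    have hl : ∀ q ∈ l, q.1 < n := fun q hq => h q (List.mem_cons_of_mem _ hq)
    have hp : p.1 < n := h p (List.mem_cons_self ..)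
    have hrec := pvPass2_insert_shift c n lo l hl
    simp only [pvPass2] at hrec
    by_cases hc : pvClean p.2 = c
    · have hcond : pvCond (lo.insert c n) p = false := by
        simp only [pvCond, hc, PySem.Dict.getD_insert_self]
        have : (n == p.1) = false := by simp [Int.ne_of_gt hp]
        simp [this]
      by_cases hold : pvCond lo p
      · simp [pvPass2, hcond, hold, hc, hrec]
      · simp [pvPass2, hcond, hold, hrec]
    · have hgd : (lo.insert c n).getD (pvClean p.2) (-1) = lo.getD (pvClean p.2) (-1) :=
        PySem.Dict.getD_insert_of_ne lo _ _ hc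
      have hcond : pvCond (lo.insert c n) p = pvCond lo p := by
        simp [pvCond, hgd]
      by_cases hold : pvCond lo p
      · simp [pvPass2, hcond, hold, hrec, bne_iff_ne, hc]
      · simp [pvPass2, hcond, hold, hrec]

lemma enum_bound (xs : List String) :
    ∀ p ∈ PySem.List.enumerate xs, p.1 < (xs.length : Int) := by
  intro p hp
  rcases (PySem.List.mem_enumerate_iff xs 0 p).1 hp with ⟨k, hk, rfl⟩
  simp
  omega

lemma A_eq : ∀ (data : List String),
    get_unique_non_numeric_refs data = pvLast (pvF data) := by
  intro data
  induction data using List.reverseRecOn with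
  | nil => simp [A_unfold, pvPass2, pvF, pvLast, PySem.List.enumerate_nil]
  | append_singleton xs x ih =>
    rw [A_unfold] at ih ⊢
    rw [pvF_append, pvLo_append,
        PySem.List.enumerate_append, PySem.List.enumerate_cons, PySem.List.enumerate_nil]
    simp only [Int.zero_add]
    by_cases hk : pvKeep x
    · simp only [hk, if_pos]
      rw [pvPass2_append, pvPass2_insert_shift (pvClean x) (xs.length : Int) (pvLo xs)
            (PySem.List.enumerate xs) (enum_bound xs), ih]
      have hcond : pvCond ((pvLo xs).insert (pvClean x) (xs.length : Int))
          ((xs.length : Int), x) = true := by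
        simp [pvCond, hk, PySem.Dict.getD_insert_self]
      rw [hcond]
      simp [pvLast_append]
    · simp only [hk, if_neg, Bool.false_eq_true, not_false_iff]
      rw [pvPass2_append]
      have hcond : pvCond (pvLo xs) ((xs.length : Int), x) = false := by
        simp [pvCond, hk]
      rw [hcond]
      simp [ih]

-- ===== VERDICT (by name: the statement is the Claim_ definition above) =====
theorem get_unique_non_numeric_refs_spec : Claim_equal_get_unique_non_numeric_refs := by
  intro data _
  unfold Spec_get_unique_non_numeric_refs
  rw [A_eq, B_eq]
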